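-- pv_equiv track=rewrite | github.com/Dhruv-Panwala/Health-Workers-Assistant-Project | pocketflow-text2sql/New.py | drop_subset_token_groups
-- ===== SOURCE A (Python) =====
-- from typing import Any, Dict, List, Optional, Sequence, Tuple
--
-- def dedupe_token_groups(groups: Sequence[Sequence[str]]) -> List[List[str]]:
--     cleaned_groups: List[List[str]] = []
--     seen_signatures = set()
--     for group in groups:
--         cleaned_group: List[str] = []
--         seen_tokens = set()
--         for token in group:
--             if not token or token in seen_tokens:
--                 continue
--             cleaned_group.append(token)
--             seen_tokens.add(token)
--         signature = tuple(cleaned_group)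
--         if not cleaned_group or signature in seen_signatures:
--             continue
--         cleaned_groups.append(cleaned_group)
--         seen_signatures.add(signature)
--
--     return cleaned_groups
--
-- def drop_subset_token_groups(groups: Sequence[Sequence[str]]) -> List[List[str]]:
--     cleaned_groups = dedupe_token_groups(groups)
--
--     filtered_groups: List[List[str]] = []
--     group_sets = [set(group) for group in cleaned_groups]
--     for index, group in enumerate(cleaned_groups):
--         group_set = group_sets[index]
--         if any(group_set < other_group_set for other_group_set in group_sets):
--             continue
--         filtered_groups.append(group)
--     return filtered_groups
-- ===== SOURCE B (Python) =====
-- def dedupe_token_groups(groups):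
--     cleaned_groups = []
--     seen_signatures = set()
--     for group in groups:
--         cleaned_group = []
--         seen_tokens = set()
--         for token in group:
--             if not token or token in seen_tokens:
--                 continue
--             cleaned_group.append(token)
--             seen_tokens.add(token)
--         signature = tuple(cleaned_group)
--         if not cleaned_group or signature in seen_signatures:
--             continue
--         cleaned_groups.append(cleaned_group)
--         seen_signatures.add(signature)
--     return cleaned_groups
--
--
-- def drop_subset_token_groups(groups):
--     cleaned = dedupe_token_groups(groups)
--     # sort (index, group) pairs by set size, largest first (stable)
--     indexed = sorted(enumerate(cleaned), key=lambda p: -len(set(p[1])))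
--     kept = []
--     maximal = []
--     for idx, group in indexed:
--         s = set(group)
--         # a proper superset is strictly larger, hence already in `maximal`
--         if not any(s < m for m in maximal):
--             kept.append((idx, group))
--         maximal.append(s)
--     kept.sort(key=lambda p: p[0])
--     return [g for _, g in kept]
-- ===== Notes on version B (the rewrite author's own statement) =====
-- stated objective: alternative
-- what changed: B keeps the dedupe step but replaces A's all-pairs proper-subset scan (each group tested against every group's set) by a stable sort of the (index, group) pairs on descending set size and one pass that tests each group only against the sets seen so far (all at least as large), then restores the original order by re-sorting the kept pairs on their stored index.
import Mathlib
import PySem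

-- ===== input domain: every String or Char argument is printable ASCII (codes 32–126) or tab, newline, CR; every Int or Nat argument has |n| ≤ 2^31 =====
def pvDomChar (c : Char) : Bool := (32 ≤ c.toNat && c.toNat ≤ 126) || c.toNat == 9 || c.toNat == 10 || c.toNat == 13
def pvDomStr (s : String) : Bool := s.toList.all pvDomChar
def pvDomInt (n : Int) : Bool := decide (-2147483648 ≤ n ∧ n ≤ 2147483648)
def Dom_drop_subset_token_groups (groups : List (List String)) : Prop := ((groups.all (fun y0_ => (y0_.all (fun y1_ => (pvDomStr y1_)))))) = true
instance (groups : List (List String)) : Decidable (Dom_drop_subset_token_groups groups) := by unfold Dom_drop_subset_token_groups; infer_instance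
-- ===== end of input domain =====

-- B keeps A's dedupe step but replaces the all-pairs proper-subset scan by a stable sort on
-- descending set size followed by one pass that only compares against previously seen (≥-size)
-- sets, restoring the original order via the stored indices (objective: alternative algorithm).

-- ===== PORT A =====
-- Python's proper-subset test `s < t` on sets (shared by both ports)
def pvProperSubset (s t : PySem.Set String) : Bool :=
  PySem.Set.issubset s t && !(PySem.Set.issubset t s)

-- helper `dedupe_token_groups` from A's module (B keeps this step verbatim)
def dedupe_token_groups (groups : List (List String)) : List (List String) :=
  (groups.foldl (fun (acc : List (List String) × PySem.Set (List String)) group =>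
      let cg := group.foldl (fun (inner : List String × PySem.Set String) token =>
          if token == "" || PySem.Set.contains inner.2 token then inner
          else (inner.1 ++ [token], PySem.Set.add inner.2 token)) ([], PySem.Set.empty)
      if cg.1 == ([] : List String) || PySem.Set.contains acc.2 cg.1 then acc
      else (acc.1 ++ [cg.1], PySem.Set.add acc.2 cg.1))
    ([], PySem.Set.empty)).1

def drop_subset_token_groups (groups : List (List String)) : List (List String) :=
  let cleaned := dedupe_token_groups groups
  let groupSets := cleaned.map (fun g => PySem.Set.ofList g)
  (PySem.List.enumerate cleaned).foldl (fun acc p =>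
    let groupSet := PySem.List.pyGetD groupSets p.1 PySem.Set.empty
    if groupSets.any (fun t => pvProperSubset groupSet t) then acc
    else acc ++ [p.2]) []

-- ===== PORT B =====
def drop_subset_token_groups_alt (groups : List (List String)) : List (List String) :=
  let cleaned := dedupe_token_groups groups
  let indexed := PySem.List.sorted (PySem.List.enumerate cleaned)
      (fun p => -(PySem.Set.len (PySem.Set.ofList p.2)))
  let res := indexed.foldl
      (fun (acc : List (Int × List String) × List (PySem.Set String)) p =>
        let s := PySem.Set.ofList p.2
        (if acc.2.any (fun m => pvProperSubset s m) then acc.1 else acc.1 ++ [p],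
         acc.2 ++ [s]))
      ([], [])
  (PySem.List.sorted res.1 (fun p => p.1)).map (fun p => p.2)

-- ===== PRECONDITION & SPEC =====
def Spec_drop_subset_token_groups (groups : List (List String)) (out : List (List String)) : Prop := out = drop_subset_token_groups_alt groups
instance (groups : List (List String)) (out : List (List String)) : Decidable (Spec_drop_subset_token_groups groups out) := by unfold Spec_drop_subset_token_groups; infer_instance

-- ===== CLAIM (what is proved, stated in full; the proofs are below) =====
def Claim_equal_drop_subset_token_groups : Prop := ∀ (groups : List (List String)), Dom_drop_subset_token_groups groups → Spec_drop_subset_token_groups groups (drop_subset_token_groups groups)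

-- ===== LEMMAS AND PROOFS =====

-- the set of a (index, group) pair
def pvSetOf (p : Int × List String) : PySem.Set String := PySem.Set.ofList p.2

-- A's keep-condition: the group's set is a proper subset of no set in `allSets`
def pvKeep (allSets : List (PySem.Set String)) (p : Int × List String) : Bool :=
  !(allSets.any (fun t => pvProperSubset (PySem.Set.ofList p.2) t))

-- what B's single pass keeps, as a recursive filter whose context `m` grows with each element
def pvFilterCtx (m : List (PySem.Set String)) : List (Int × List String) → List (Int × List String)
  | [] => []
  | p :: rest =>
    (if m.any (fun t => pvProperSubset (PySem.Set.ofList p.2) t) then [] else [p])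
      ++ pvFilterCtx (m ++ [PySem.Set.ofList p.2]) rest

lemma pvProperSubset_irrefl (s : PySem.Set String) : pvProperSubset s s = false := by
  simp [pvProperSubset]

lemma pvProperSubset_length {s t : PySem.Set String} (hs : s.Nodup)
    (h : pvProperSubset s t = true) : s.length < t.length := by
  unfold pvProperSubset at h
  rw [Bool.and_eq_true, Bool.not_eq_true'] at h
  obtain ⟨hsub, hnsub⟩ := h
  rw [PySem.Set.issubset_iff] at hsub
  have hx : ∃ x ∈ t, x ∉ s := by
    by_contra hc
    push Not at hc
    exact absurd ((PySem.Set.issubset_iff t s).mpr hc) (by simp [hnsub])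
  obtain ⟨x, hxt, hxs⟩ := hx
  have hnd : (x :: s).Nodup := List.nodup_cons.mpr ⟨hxs, hs⟩
  have hsub' : (x :: s) ⊆ t := by
    intro y hy
    rcases List.mem_cons.mp hy with rfl | hy
    · exact hxt
    · exact hsub y hy
  have := List.Subperm.length_le (List.subperm_of_subset hnd hsub')
  simpa using this

-- A's result is a plain filter of the enumerated cleaned list
lemma pvA_char (groups : List (List String)) :
    drop_subset_token_groups groups =
      ((PySem.List.enumerate (dedupe_token_groups groups)).filter
          (pvKeep ((dedupe_token_groups groups).map (fun g => PySem.Set.ofList g)))).map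
        (fun p => p.2) := by
  simp only [drop_subset_token_groups]
  refine (PySem.List.foldl_congr_mem _ _
      (fun acc p => if pvKeep ((dedupe_token_groups groups).map (fun g => PySem.Set.ofList g)) p
        then acc ++ [p.2] else acc) _ ?_).trans ?_
  · intro acc p hp
    rw [PySem.List.mem_enumerate_iff] at hp
    obtain ⟨k, hk, rfl⟩ := hp
    have hget : PySem.List.pyGetD ((dedupe_token_groups groups).map (fun g => PySem.Set.ofList g))
        (0 + (k : Int)) PySem.Set.empty
        = PySem.Set.ofList (dedupe_token_groups groups)[k] := by
      have h0 : ((0 : Int) + (k : Int)) = ((k : Nat) : Int) := by simp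
      rw [h0, PySem.List.pyGetD_natCast]
      simp [List.getD_eq_getElem?_getD, hk]
    rw [hget]
    cases hb : ((dedupe_token_groups groups).map (fun g => PySem.Set.ofList g)).any
        (fun t => pvProperSubset (PySem.Set.ofList (dedupe_token_groups groups)[k]) t) <;>
      simp [pvKeep, hb]
  · rw [PySem.List.foldl_append_if]
    simp

-- B's loop, characterised
lemma pvLoopB (S : List (Int × List String)) :
    ∀ (k0 : List (Int × List String)) (m0 : List (PySem.Set String)),
      S.foldl (fun (acc : List (Int × List String) × List (PySem.Set String)) p =>
          (if acc.2.any (fun m => pvProperSubset (PySem.Set.ofList p.2) m) then acc.1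
           else acc.1 ++ [p],
           acc.2 ++ [PySem.Set.ofList p.2])) (k0, m0)
        = (k0 ++ pvFilterCtx m0 S, m0 ++ S.map pvSetOf) := by
  induction S with
  | nil => intro k0 m0; simp [pvFilterCtx]
  | cons p rest ih =>
    intro k0 m0
    simp only [List.foldl_cons]
    by_cases h : m0.any (fun m => pvProperSubset (PySem.Set.ofList p.2) m) = true
    · rw [ih]
      simp [pvFilterCtx, h, pvSetOf]
    · rw [Bool.not_eq_true] at h
      rw [ih]
      simp [pvFilterCtx, h, pvSetOf]

-- a context filter whose condition is context-independent is a plain filter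
lemma pvFilterCtx_eq_filter (Q : Int × List String → Bool) :
    ∀ (S : List (Int × List String)) (m0 : List (PySem.Set String)),
      (∀ pre p suf, S = pre ++ p :: suf →
        ((m0 ++ pre.map pvSetOf).any (fun t => pvProperSubset (PySem.Set.ofList p.2) t)) = !Q p) →
      pvFilterCtx m0 S = S.filter Q := by
  intro S
  induction S with
  | nil => intro m0 _; simp [pvFilterCtx]
  | cons p rest ih =>
    intro m0 h
    have h0 := h [] p rest rfl
    simp only [List.map_nil, List.append_nil] at h0
    have hrest := ih (m0 ++ [PySem.Set.ofList p.2]) (by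
      intro pre q suf hsplit
      have := h (p :: pre) q suf (by rw [hsplit]; rfl)
      simpa [pvSetOf, List.append_assoc] using this)
    unfold pvFilterCtx
    rw [h0, hrest]
    cases hq : Q p <;> simp [hq]

-- in size-descending order every proper superset is already in the prefix
lemma pvPrefix_any_eq (L : List (List String)) (pre suf : List (Int × List String))
    (p : Int × List String)
    (hS : PySem.List.sorted (PySem.List.enumerate L)
        (fun q => -(PySem.Set.len (PySem.Set.ofList q.2))) = pre ++ p :: suf) :
    (pre.map pvSetOf).any (fun t => pvProperSubset (PySem.Set.ofList p.2) t)
      = (L.map (fun g => PySem.Set.ofList g)).any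
          (fun t => pvProperSubset (PySem.Set.ofList p.2) t) := by
  have hperm := PySem.List.sorted_perm (PySem.List.enumerate L)
      (fun q => -(PySem.Set.len (PySem.Set.ofList q.2))) false
  rw [hS] at hperm
  have hpw := PySem.List.sorted_pairwise (PySem.List.enumerate L)
      (fun q => -(PySem.Set.len (PySem.Set.ofList q.2)))
  rw [hS] at hpw
  rw [Bool.eq_iff_iff]
  simp only [List.any_eq_true]
  constructor
  · rintro ⟨t, ht, hpt⟩
    obtain ⟨q, hq, rfl⟩ := List.mem_map.mp ht
    have hqe : q ∈ PySem.List.enumerate L 0 :=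
      hperm.mem_iff.mp (List.mem_append.mpr (Or.inl hq))
    rw [PySem.List.mem_enumerate_iff] at hqe
    obtain ⟨k, hk, rfl⟩ := hqe
    exact ⟨pvSetOf (0 + (k : Int), L[k]),
      List.mem_map.mpr ⟨L[k], List.getElem_mem hk, rfl⟩, hpt⟩
  · rintro ⟨t, ht, hpt⟩
    obtain ⟨g, hg, rfl⟩ := List.mem_map.mp ht
    have hg' : g ∈ (PySem.List.enumerate L 0).map (fun x => x.2) := by
      rw [PySem.List.map_snd_enumerate]; exact hg
    obtain ⟨q, hq, hq2⟩ := List.mem_map.mp hg'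
    have hqS : q ∈ pre ++ p :: suf := hperm.mem_iff.mpr hq
    rcases List.mem_append.mp hqS with hqpre | hqps
    · exact ⟨PySem.Set.ofList g,
        List.mem_map.mpr ⟨q, hqpre, by simp [pvSetOf, hq2]⟩, hpt⟩
    · rcases List.mem_cons.mp hqps with rfl | hqsuf
      · rw [hq2] at hpt
        rw [pvProperSubset_irrefl] at hpt
        exact absurd hpt (by simp)
      · obtain ⟨-, hps, -⟩ := List.pairwise_append.mp hpw
        have h1 := (List.pairwise_cons.mp hps).1 q hqsuf
        have hlen := pvProperSubset_length (PySem.Set.nodup_ofList p.2) hpt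
        rw [hq2] at h1
        simp only [PySem.Set.len] at h1
        omega

-- ===== VERDICT (by name: the statement is the Claim_ definition above) =====
theorem drop_subset_token_groups_spec : Claim_equal_drop_subset_token_groups := by
  unfold Claim_equal_drop_subset_token_groups
  intro groups _
  unfold Spec_drop_subset_token_groups
  rw [pvA_char]
  simp only [drop_subset_token_groups_alt]
  rw [pvLoopB]
  simp only [List.nil_append]
  have hfix : pvFilterCtx []
      (PySem.List.sorted (PySem.List.enumerate (dedupe_token_groups groups))
        (fun p => -(PySem.Set.len (PySem.Set.ofList p.2))))
      = (PySem.List.sorted (PySem.List.enumerate (dedupe_token_groups groups))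
          (fun p => -(PySem.Set.len (PySem.Set.ofList p.2)))).filter
          (pvKeep ((dedupe_token_groups groups).map (fun g => PySem.Set.ofList g))) := by
    apply pvFilterCtx_eq_filter
    intro pre p suf hsplit
    simp only [List.nil_append]
    rw [pvPrefix_any_eq (dedupe_token_groups groups) pre suf p hsplit]
    simp [pvKeep]
  rw [hfix]
  have hperm : (List.filter
        (pvKeep ((dedupe_token_groups groups).map (fun g => PySem.Set.ofList g)))
        (PySem.List.enumerate (dedupe_token_groups groups))).Perm
      ((PySem.List.sorted (PySem.List.enumerate (dedupe_token_groups groups))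
          (fun p => -(PySem.Set.len (PySem.Set.ofList p.2)))).filter
        (pvKeep ((dedupe_token_groups groups).map (fun g => PySem.Set.ofList g)))) :=
    (List.Perm.filter _ (PySem.List.sorted_perm _ _ false)).symm
  have hpair : (List.filter
        (pvKeep ((dedupe_token_groups groups).map (fun g => PySem.Set.ofList g)))
        (PySem.List.enumerate (dedupe_token_groups groups))).Pairwise
      (fun a b => a.1 < b.1) :=
    List.Pairwise.sublist List.filter_sublist (PySem.List.pairwise_lt_enumerate _ 0)
  rw [PySem.List.sorted_eq_of_perm_of_pairwise_lt _ _ (fun p => p.1) hperm hpair]
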